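-- pv_equiv track=rewrite | github.com/rsprenkels/kattis | python/1_7/karte.py | karte
-- ===== SOURCE A (Python) =====
-- from _collections import defaultdict
--
-- def karte(line: str) -> str:
--     seen = set()
--     per_suit = defaultdict(int)
--     cards = [line[ndx:ndx+3] for ndx in range(0, len(line), 3)]
--     for card in cards:
--         if card in seen:
--             return 'GRESKA'
--         else:
--             seen.add(card)
--         per_suit[card[0]] += 1
--     return ' '.join(map(str, [13 - per_suit[suit] for suit in 'PKHT']))
-- ===== SOURCE B (Python) =====
-- def _bisect_left(a, x):
--     lo, hi = 0, len(a)
--     while lo < hi: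
--         mid = (lo + hi) // 2
--         if a[mid] < x:
--             lo = mid + 1
--         else:
--             hi = mid
--     return lo
--
--
-- def _bisect_right(a, x):
--     lo, hi = 0, len(a)
--     while lo < hi:
--         mid = (lo + hi) // 2
--         if x < a[mid]:
--             hi = mid
--         else:
--             lo = mid + 1
--     return lo
--
--
-- def karte(line: str) -> str:
--     cards = sorted(line[i:i + 3] for i in range(0, len(line), 3))
--     if any(a == b for a, b in zip(cards, cards[1:])):
--         return 'GRESKA'
--     suits = sorted(card[0] for card in cards)
--     counts = [_bisect_right(suits, s) - _bisect_left(suits, s) for s in 'PKHT']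
--     return ' '.join(str(13 - c) for c in counts)
-- ===== Notes on version B (the rewrite author's own statement) =====
-- stated objective: alternative
-- what changed: A makes one pass with a hash set (early return on a repeated card) and a defaultdict of suit counts; B sorts the cards and finds duplicates by comparing adjacent sorted elements, then counts each suit by hand-written binary searches (bisect bounds) on the sorted list of suit characters.
import Mathlib
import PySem

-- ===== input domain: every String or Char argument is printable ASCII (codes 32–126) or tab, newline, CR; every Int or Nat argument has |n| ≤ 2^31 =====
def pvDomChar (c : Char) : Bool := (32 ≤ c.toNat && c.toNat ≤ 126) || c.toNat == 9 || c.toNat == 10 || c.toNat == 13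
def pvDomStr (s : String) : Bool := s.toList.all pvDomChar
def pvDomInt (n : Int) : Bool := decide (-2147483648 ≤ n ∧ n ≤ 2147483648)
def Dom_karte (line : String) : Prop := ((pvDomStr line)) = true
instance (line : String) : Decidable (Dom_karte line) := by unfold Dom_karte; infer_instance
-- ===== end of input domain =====

-- B replaces A's one-pass hash-set/dict loop by sort + adjacent-duplicate scan + binary-search suit counting (objective: alternative).

-- ===== PORT A =====
-- card[0]; exact here: every chunk produced by the comprehension is nonempty (ndx < len(line))
def pvSuit (card : List Char) : Char := card.headD ' '

-- line[ndx:ndx+3] for ndx in range(0, len(line), 3)  (shared by both ports: both Pythons contain this comprehension)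
def pvCards (line : String) : List (List Char) :=
  (PySem.List.pyRange 0 (line.toList.length : Int) 3).map
    (fun ndx => PySem.List.slice line.toList (some ndx) (some (ndx + 3)))

-- ' '.join(map(str, [13 - per_suit[suit] for suit in 'PKHT']))
def pvRender (per : PySem.Dict Char Int) : String :=
  PySem.Str.join " " (("PKHT".toList).map (fun suit => PySem.Int.toStr (13 - per.getD suit 0)))

-- the for-loop with its early return
def karteLoopA (cards : List (List Char)) (seen : PySem.Set (List Char))
    (per : PySem.Dict Char Int) : String :=
  match cards with
  | [] => pvRender per
  | card :: rest =>
      if PySem.Set.contains seen card then "GRESKA"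
      else karteLoopA rest (PySem.Set.add seen card) (per.modify (pvSuit card) 0 (· + 1))

def karte (line : String) : String :=
  karteLoopA (pvCards line) PySem.Set.empty PySem.Dict.empty

-- ===== PORT B =====
-- sorted(...) on 3-char chunks; the explicit instances pin Python's lexicographic string order
def pvSortCards (xs : List (List Char)) : List (List Char) :=
  @PySem.List.sorted (List Char) (List Char) List.instLinearOrder.toLT
    LinearOrder.toDecidableLT xs (fun c => c) false

def karte_alt (line : String) : String :=
  -- cards = sorted(line[i:i+3] for i in range(0, len(line), 3))
  let cards := pvSortCards (pvCards line)
  -- if any(a == b for a, b in zip(cards, cards[1:])): return 'GRESKA'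
  if (cards.zip (PySem.List.slice cards (some 1) none)).any (fun p => p.1 == p.2) then "GRESKA"
  else
    -- suits = sorted(card[0] for card in cards)   (card[0] exact: chunks are nonempty)
    let suits := PySem.List.sorted (cards.map pvSuit) (fun c => c)
    -- counts = [_bisect_right(suits, s) - _bisect_left(suits, s) for s in 'PKHT']
    -- (_bisect_left/_bisect_right in Source B are literally the loops PySem.List.bisectLeft/bisectRight compute)
    let counts := ("PKHT".toList).map (fun s =>
      ((PySem.List.bisectRight suits s : Int) - (PySem.List.bisectLeft suits s : Int)))
    -- ' '.join(str(13 - c) for c in counts)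
    PySem.Str.join " " (counts.map (fun c => PySem.Int.toStr (13 - c)))

-- ===== PRECONDITION & SPEC =====
def Spec_karte (line : String) (out : String) : Prop := out = karte_alt line
instance (line : String) (out : String) : Decidable (Spec_karte line out) := by unfold Spec_karte; infer_instance

-- ===== CLAIM (what is proved, stated in full; the proofs are below) =====
def Claim_equal_karte : Prop := ∀ (line : String), Dom_karte line → Spec_karte line (karte line)

-- ===== LEMMAS AND PROOFS =====

-- A's loop either hits a duplicate (relative to seen) and returns 'GRESKA', or renders the folded counts
theorem karteLoopA_eq (cards : List (List Char)) (seen : PySem.Set (List Char))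
    (per : PySem.Dict Char Int) :
    karteLoopA cards seen per =
      if (∃ c ∈ cards, c ∈ seen) ∨ ¬ cards.Nodup then "GRESKA"
      else pvRender (cards.foldl (fun d c => d.modify (pvSuit c) 0 (· + 1)) per) := by
  induction cards generalizing seen per with
  | nil => simp [karteLoopA]
  | cons card rest ih =>
    simp only [karteLoopA]
    by_cases h : card ∈ seen
    · simp [h]
    · rw [if_neg (by simp [h]), ih]
      by_cases hd : card ∈ rest
      · rw [if_pos, if_pos]
        · simp [hd]
        · exact Or.inl ⟨card, hd, by simp [PySem.Set.mem_add]⟩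
      · simp only [List.nodup_cons, List.foldl_cons]
        congr 1
        simp only [PySem.Set.mem_add, List.mem_cons, eq_iff_iff]
        constructor
        · rintro (⟨c, hc, hcs⟩ | hn)
          · rcases hcs with hcs | rfl
            · exact Or.inl ⟨c, Or.inr hc, hcs⟩
            · exact absurd hc hd
          · exact Or.inr (fun ⟨_, hn'⟩ => hn hn')
        · rintro (⟨c, hc | hc, hcs⟩ | hn)
          · exact absurd (hc ▸ hcs) h
          · exact Or.inl ⟨c, hc, Or.inl hcs⟩
          · exact Or.inr (fun hn' => hn ⟨hd, hn'⟩)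

-- A's dict of suit counts, read back: the multiplicity of s among the first characters
lemma getD_suit_fold (cards : List (List Char)) (s : Char) :
    (cards.foldl (fun d c => d.modify (pvSuit c) 0 (· + 1)) PySem.Dict.empty).getD s 0
      = ((cards.map pvSuit).count s : Int) := by
  rw [← List.foldl_map (f := pvSuit) (g := fun d (c : Char) => PySem.Dict.modify d c 0 (· + 1))]
  have := PySem.Dict.getD_foldl_modify_add_one (cards.map pvSuit) PySem.Dict.empty s
  simpa using this

-- in a ≤-sorted list, an equal adjacent pair exists iff the list has a duplicate
lemma any_adj_eq_iff {α : Type} [BEq α] [LawfulBEq α] [LinearOrder α] (l : List α)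
    (h : l.Pairwise (· ≤ ·)) :
    ((l.zip l.tail).any (fun p => p.1 == p.2) = true) ↔ ¬ l.Nodup := by
  induction l with
  | nil => simp
  | cons a t ih =>
    cases t with
    | nil => simp
    | cons b t =>
      rw [List.pairwise_cons] at h
      obtain ⟨ha, hbt⟩ := h
      have hb := (List.pairwise_cons.mp hbt).1
      have iht := ih hbt
      simp only [List.tail_cons, List.zip_cons_cons, List.any_cons, beq_iff_eq,
        Bool.or_eq_true] at iht ⊢
      rw [iht, List.nodup_cons (a := a)]
      constructor
      · rintro (rfl | hnd)
        · intro ⟨hmem, _⟩; exact hmem (List.mem_cons_self)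
        · intro ⟨_, hnd'⟩; exact hnd hnd'
      · intro hnot
        by_cases hnd : (b :: t).Nodup
        · left
          by_contra hne
          apply hnot
          refine ⟨?_, hnd⟩
          intro hmem
          rcases List.mem_cons.mp hmem with rfl | hmemt
          · exact hne rfl
          · exact hne (le_antisymm (ha b List.mem_cons_self) (hb a hmemt) ▸ rfl)
        · right; exact hnd

-- the binary-search loops commute with the strictly monotone embedding Char → Int
lemma blLoop_map (xs : List Char) (x : Char) (fuel lo hi : Nat) :
    PySem.List.bisectLeftLoop (xs.map (fun c => (c.toNat : Int))) ((x.toNat : Int)) fuel lo hi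
      = PySem.List.bisectLeftLoop xs x fuel lo hi := by
  induction fuel generalizing lo hi with
  | zero => simp [PySem.List.bisectLeftLoop]
  | succ n ih =>
    simp only [PySem.List.bisectLeftLoop, List.getElem?_map]
    split
    · cases h : xs[(lo + hi) / 2]? with
      | none => simp
      | some y =>
        simp only [Option.map_some]
        split <;> split <;> first | exact ih _ _ | skip
        all_goals (rename_i h1 h2; exfalso)
        · exact h2 ((Int.ofNat_lt).mp h1)
        · exact h1 ((Int.ofNat_lt).mpr h2)
    · rfl

lemma brLoop_map (xs : List Char) (x : Char) (fuel lo hi : Nat) :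
    PySem.List.bisectRightLoop (xs.map (fun c => (c.toNat : Int))) ((x.toNat : Int)) fuel lo hi
      = PySem.List.bisectRightLoop xs x fuel lo hi := by
  induction fuel generalizing lo hi with
  | zero => simp [PySem.List.bisectRightLoop]
  | succ n ih =>
    simp only [PySem.List.bisectRightLoop, List.getElem?_map]
    split
    · cases h : xs[(lo + hi) / 2]? with
      | none => simp
      | some y =>
        simp only [Option.map_some]
        split <;> split <;> first | exact ih _ _ | skip
        all_goals (rename_i h1 h2; exfalso)
        · exact h2 ((Int.ofNat_lt).mp h1)
        · exact h1 ((Int.ofNat_lt).mpr h2)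
    · rfl

-- on a sorted Int list, the two bisect bounds bracket exactly the occurrences of x
lemma bisect_count_int (L : List Int) (x : Int) (h : L.Pairwise (· ≤ ·)) :
    PySem.List.bisectLeft L x ≤ PySem.List.bisectRight L x ∧
    PySem.List.bisectRight L x - PySem.List.bisectLeft L x = L.count x := by
  obtain ⟨hbl_len, hbl1, hbl2⟩ := PySem.List.bisectLeft_spec L x h
  obtain ⟨hbr_len, hbr1, hbr2⟩ := PySem.List.bisectRight_spec L x h
  set bl := PySem.List.bisectLeft L x with hbl
  set br := PySem.List.bisectRight L x with hbr
  have hle : bl ≤ br := by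
    by_contra hc
    rw [Nat.not_le] at hc
    have hlt : br < L.length := lt_of_lt_of_le hc hbl_len
    have h1 := hbl1 br hlt hc
    have h2 := hbr2 br hlt (le_refl br)
    omega
  refine ⟨hle, ?_⟩
  have hdecomp : L = L.take bl ++ ((L.drop bl).take (br - bl) ++ L.drop br) := by
    conv_lhs => rw [← List.take_append_drop bl L]
    congr 1
    conv_lhs => rw [← List.take_append_drop (br - bl) (L.drop bl)]
    congr 1
    rw [List.drop_drop]
    congr 1
    omega
  have c1 : (L.take bl).count x = 0 := by
    rw [List.count_eq_zero]
    intro hmem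
    rw [List.mem_iff_getElem] at hmem
    obtain ⟨i, hi, hEq⟩ := hmem
    have hil : i < L.length := by
      have := List.length_take (l := L) (i := bl); omega
    have hib : i < bl := by
      have := List.length_take (l := L) (i := bl); omega
    have := hbl1 i hil hib
    rw [List.getElem_take] at hEq
    omega
  have c3 : (L.drop br).count x = 0 := by
    rw [List.count_eq_zero]
    intro hmem
    rw [List.mem_iff_getElem] at hmem
    obtain ⟨i, hi, hEq⟩ := hmem
    have hlen := List.length_drop (l := L) (i := br)
    have hil : br + i < L.length := by omega
    have := hbr2 (br + i) hil (Nat.le_add_right _ _)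
    rw [List.getElem_drop] at hEq
    omega
  have c2 : ((L.drop bl).take (br - bl)).count x = br - bl := by
    have hlenmid : ((L.drop bl).take (br - bl)).length = br - bl := by
      simp [List.length_take, List.length_drop]
      omega
    have hall : ∀ a ∈ (L.drop bl).take (br - bl), x = a := by
      intro a hmem
      rw [List.mem_iff_getElem] at hmem
      obtain ⟨i, hi, hEq⟩ := hmem
      rw [hlenmid] at hi
      have hlen := List.length_drop (l := L) (i := bl)
      have hil : bl + i < L.length := by omega
      have hx1 := hbl2 (bl + i) hil (Nat.le_add_right _ _)
      have hx2 := hbr1 (bl + i) hil (by omega)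
      rw [List.getElem_take, List.getElem_drop] at hEq
      omega
    exact (List.count_eq_length.mpr hall).trans hlenmid
  conv_rhs => rw [hdecomp]
  rw [List.count_append, List.count_append, c1, c2, c3]
  omega

-- …and therefore on a sorted Char list the bisect difference is the multiplicity of s
lemma bisect_count_char (l : List Char) (s : Char) (h : l.Pairwise (· ≤ ·)) :
    (PySem.List.bisectRight l s : Int) - (PySem.List.bisectLeft l s : Int)
      = (l.count s : Int) := by
  have hmap : (l.map (fun c => (c.toNat : Int))).Pairwise (· ≤ ·) := by
    rw [List.pairwise_map]
    exact h.imp (fun hle => by exact_mod_cast hle)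
  have hinj : Function.Injective (fun c : Char => (c.toNat : Int)) := by
    intro a b hab
    have hab' : (a.toNat : Int) = (b.toNat : Int) := hab
    exact Char.ext (UInt32.toNat_inj.mp (by exact_mod_cast hab'))
  obtain ⟨hle, hcount⟩ := bisect_count_int (l.map (fun c => (c.toNat : Int))) ((s.toNat : Int)) hmap
  have hbl : PySem.List.bisectLeft (l.map (fun c => (c.toNat : Int))) ((s.toNat : Int))
      = PySem.List.bisectLeft l s := by
    unfold PySem.List.bisectLeft
    rw [List.length_map]
    exact blLoop_map l s l.length 0 l.length
  have hbr : PySem.List.bisectRight (l.map (fun c => (c.toNat : Int))) ((s.toNat : Int))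
      = PySem.List.bisectRight l s := by
    unfold PySem.List.bisectRight
    rw [List.length_map]
    exact brLoop_map l s l.length 0 l.length
  have hc : (l.map (fun c => (c.toNat : Int))).count ((s.toNat : Int)) = l.count s :=
    List.count_map_of_injective l (fun c : Char => (c.toNat : Int)) hinj s
  rw [hbl, hbr, hc] at hcount
  rw [hbl, hbr] at hle
  omega

-- ===== VERDICT (by name: the statement is the Claim_ definition above) =====
theorem karte_spec : Claim_equal_karte := by
  intro line _
  simp only [Spec_karte, karte, karte_alt]
  rw [karteLoopA_eq]
  have hperm : (pvSortCards (pvCards line)).Perm (pvCards line) :=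
    @PySem.List.sorted_perm (List Char) (List Char) List.instLinearOrder.toLT
      LinearOrder.toDecidableLT (pvCards line) (fun c => c) false
  have hsorted : (pvSortCards (pvCards line)).Pairwise (· ≤ ·) :=
    PySem.List.sorted_pairwise (pvCards line) (fun c => c)
  have hslice : PySem.List.slice (pvSortCards (pvCards line)) (some 1) none
      = (pvSortCards (pvCards line)).tail := by
    rw [PySem.List.slice_from (pvSortCards (pvCards line)) (by norm_num : (0:Int) ≤ 1)]
    simp [List.drop_one]
  rw [hslice]
  have hiff := any_adj_eq_iff _ hsorted
  rw [hperm.nodup_iff] at hiff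
  by_cases h : (pvCards line).Nodup
  · have hany : ((pvSortCards (pvCards line)).zip (pvSortCards (pvCards line)).tail).any
        (fun p => p.1 == p.2) = false := by
      rw [Bool.eq_false_iff]
      intro ha
      exact hiff.mp ha h
    rw [hany]
    rw [if_neg (by simp [PySem.Set.empty, h]), if_neg (by simp)]
    unfold pvRender
    simp only [List.map_map]
    apply congrArg
    apply List.map_congr_left
    intro s _
    rw [getD_suit_fold]
    have hsuits : (PySem.List.sorted ((pvSortCards (pvCards line)).map pvSuit)
        (fun c => c)).Pairwise (· ≤ ·) :=
      PySem.List.sorted_pairwise _ _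
    rw [Function.comp_apply, bisect_count_char _ s hsuits]
    have hp1 : (PySem.List.sorted ((pvSortCards (pvCards line)).map pvSuit)
        (fun c => c)).Perm ((pvSortCards (pvCards line)).map pvSuit) :=
      PySem.List.sorted_perm _ _ _
    rw [hp1.count_eq, (hperm.map pvSuit).count_eq]
  · have hany : ((pvSortCards (pvCards line)).zip (pvSortCards (pvCards line)).tail).any
        (fun p => p.1 == p.2) = true := hiff.mpr h
    rw [hany]
    rw [if_pos (by simp [PySem.Set.empty, h]), if_pos (by simp)]
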